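-- pv_equiv track=rewrite | github.com/oluwasegunadeboye72-ai/Face-Gate | Day Four/Python/Tasks Two/test_list.py | get_palindrome_flags
-- ===== SOURCE A (Python) =====
-- def get_palindrome_flags(lst):
--     result = []
--     for word in lst:
--
--         if word == word[::-1]:
--             result.append(True)
--         else:
--             result.append(False)
--     return result
-- ===== SOURCE B (Python) =====
-- def get_palindrome_flags(lst):
--     result = []
--     for word in lst:
--         i, j = 0, len(word) - 1
--         flag = True
--         while i < j:
--             if word[i] != word[j]:
--                 flag = False
--                 break
--             i += 1
--             j -= 1
--         result.append(flag)
--     return result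
-- ===== Notes on version B (the rewrite author's own statement) =====
-- stated objective: alternative
-- what changed: Each word is checked by a two-pointer scan from both ends with early exit on the first mismatch, instead of materialising the reversed slice and comparing it wholesale.
import Mathlib
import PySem

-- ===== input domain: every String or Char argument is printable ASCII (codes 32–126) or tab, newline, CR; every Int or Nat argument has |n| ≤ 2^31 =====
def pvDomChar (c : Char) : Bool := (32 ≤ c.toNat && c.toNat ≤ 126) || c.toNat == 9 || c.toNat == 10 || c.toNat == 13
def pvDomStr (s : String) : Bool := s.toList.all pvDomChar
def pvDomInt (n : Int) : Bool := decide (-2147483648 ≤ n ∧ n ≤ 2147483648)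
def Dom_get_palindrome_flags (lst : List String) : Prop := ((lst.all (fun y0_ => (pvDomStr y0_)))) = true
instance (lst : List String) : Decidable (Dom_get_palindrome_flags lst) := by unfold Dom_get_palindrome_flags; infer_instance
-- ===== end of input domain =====

-- B replaces the reversed-slice comparison by a two-pointer scan with early exit on the first mismatch (objective: alternative).

-- ===== PORT A =====
-- for word in lst: result.append(True) if word == word[::-1] else result.append(False)
def get_palindrome_flags (lst : List String) : List Bool :=
  lst.foldl (fun result word =>
    if PySem.Str.slice? word none none (-1) = some word then result ++ [true]
    else result ++ [false]) []

-- ===== PORT B =====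
-- while i < j: if word[i] != word[j]: flag = False; break; i += 1; j -= 1
def pvTwoPointer (cs : List Char) (i j : Nat) : Bool :=
  if h : i < j then
    if cs[i]? ≠ cs[j]? then false
    else pvTwoPointer cs (i+1) (j-1)
  else true
termination_by j - i
decreasing_by omega

def get_palindrome_flags_alt (lst : List String) : List Bool :=
  lst.foldl (fun result word =>
    result ++ [pvTwoPointer word.toList 0 (word.toList.length - 1)]) []

-- ===== PRECONDITION & SPEC =====
def Spec_get_palindrome_flags (lst : List String) (out : List Bool) : Prop := out = get_palindrome_flags_alt lst
instance (lst : List String) (out : List Bool) : Decidable (Spec_get_palindrome_flags lst out) := by unfold Spec_get_palindrome_flags; infer_instance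

-- ===== CLAIM (what is proved, stated in full; the proofs are below) =====
def Claim_equal_get_palindrome_flags : Prop := ∀ (lst : List String), Dom_get_palindrome_flags lst → Spec_get_palindrome_flags lst (get_palindrome_flags lst)

-- ===== LEMMAS AND PROOFS =====

theorem pvShortPal (l : List Char) (h : l.length ≤ 1) : l = l.reverse := by
  match l, h with
  | [], _ => rfl
  | [a], _ => rfl

theorem pvRevStep (a b : Char) (l : List Char) :
    (a :: (l ++ [b])).reverse = b :: (l.reverse ++ [a]) := by simp

-- a list of the shape a :: mid ++ [b] is its own reverse iff a = b and mid is
theorem pvPalStep (a b : Char) (l : List Char) :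
    (a :: (l ++ [b]) = (a :: (l ++ [b])).reverse) ↔ (a = b ∧ l = l.reverse) := by
  rw [pvRevStep]
  constructor
  · intro h
    injection h with h1 h2
    subst h1
    exact ⟨rfl, List.append_inj_left' h2 (by simp)⟩
  · rintro ⟨rfl, h⟩
    rw [← h]

-- the segment cs[i..j] decomposes as cs[i] :: cs[i+1..j-1] ++ [cs[j]]
theorem pvSegDecomp (cs : List Char) (i j : Nat) (hij : i < j) (hj : j < cs.length) :
    (cs.take (j+1)).drop i = cs[i] :: (((cs.take j).drop (i+1)) ++ [cs[j]]) := by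
  have hlen : (cs.take j).length = j := by simp; omega
  have h1 : cs.take (j+1) = cs.take j ++ [cs[j]] := by
    rw [List.take_add_one]; simp [List.getElem?_eq_getElem hj]
  rw [h1, List.drop_append_of_le_length (by omega : i ≤ (cs.take j).length)]
  have hi' : i < (cs.take j).length := by omega
  rw [List.drop_eq_getElem_cons hi']
  simp

theorem pvTwoPointer_easy (cs : List Char) (i j : Nat) (hij : ¬ i < j) (hj : j < cs.length) :
    pvTwoPointer cs i j
      = decide ((cs.take (j+1)).drop i = ((cs.take (j+1)).drop i).reverse) := by
  rw [pvTwoPointer]; simp only [dif_neg hij]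
  symm
  rw [decide_eq_true_iff]
  apply pvShortPal
  have : ((cs.take (j+1)).drop i).length = min (j+1) cs.length - i := by simp
  omega

-- the two-pointer scan decides whether the segment cs[i..j] reads the same both ways
theorem pvTwoPointer_aux (cs : List Char) (n : Nat) : ∀ (i j : Nat), j - i ≤ n → j < cs.length →
    pvTwoPointer cs i j
      = decide ((cs.take (j+1)).drop i = ((cs.take (j+1)).drop i).reverse) := by
  induction n with
  | zero =>
    intro i j hn hj
    exact pvTwoPointer_easy cs i j (by omega) hj
  | succ n ih =>
    intro i j hn hj
    by_cases hij : i < j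
    · have hi : i < cs.length := by omega
      have hseg := pvSegDecomp cs i j hij hj
      rw [pvTwoPointer]
      simp only [dif_pos hij, List.getElem?_eq_getElem hi, List.getElem?_eq_getElem hj,
        ne_eq, Option.some.injEq]
      rw [hseg]
      by_cases hab : cs[i] = cs[j]
      · rw [if_neg (not_not_intro hab)]
        have hj1 : j - 1 < cs.length := by omega
        have hrec := ih (i+1) (j-1) (by omega) hj1
        have hjj : j - 1 + 1 = j := by omega
        rw [hjj] at hrec
        rw [hrec, decide_eq_decide, pvPalStep]
        tauto
      · rw [if_pos hab]
        symm
        rw [decide_eq_false_iff_not, pvPalStep]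
        tauto
    · exact pvTwoPointer_easy cs i j hij hj

theorem pvTwoPointer_pal (cs : List Char) :
    pvTwoPointer cs 0 (cs.length - 1) = decide (cs = cs.reverse) := by
  match cs with
  | [] => rw [pvTwoPointer]; simp
  | c :: cs' =>
    have hlen : (c :: cs').length - 1 < (c :: cs').length := by simp
    rw [pvTwoPointer_aux (c :: cs') (c :: cs').length 0 ((c :: cs').length - 1)
        (by omega) hlen]
    have h2 : (c :: cs').length - 1 + 1 = (c :: cs').length := by
      simp only [List.length_cons]; omega
    rw [h2, List.take_length, List.drop_zero]

-- per word: A's reversed-slice test equals B's two-pointer scan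
theorem pvWordFlag (w : String) :
    (if PySem.Str.slice? w none none (-1) = some w then true else false)
      = pvTwoPointer w.toList 0 (w.toList.length - 1) := by
  rw [PySem.Str.slice?_none_none_neg_one, pvTwoPointer_pal]
  by_cases h : w.toList = w.toList.reverse
  · have he : String.ofList w.toList.reverse = w := by rw [← h]; exact String.ofList_toList
    rw [if_pos (by rw [he])]
    exact (decide_eq_true h).symm
  · have he : ¬ String.ofList w.toList.reverse = w := by
      intro he
      have h2 := congrArg String.toList he
      simp at h2
      exact h h2.symm
    rw [if_neg (fun hc => he (Option.some.inj hc))]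
    symm
    rw [decide_eq_false_iff_not]
    exact h

theorem pvFoldlAppend {α β : Type} (f : α → β) (lst : List α) (acc : List β) :
    lst.foldl (fun r w => r ++ [f w]) acc = acc ++ lst.map f := by
  induction lst generalizing acc with
  | nil => simp
  | cons x xs ih => simp [List.foldl, ih]

-- ===== VERDICT (by name: the statement is the Claim_ definition above) =====
theorem get_palindrome_flags_spec : Claim_equal_get_palindrome_flags := by
  intro lst _
  unfold Spec_get_palindrome_flags get_palindrome_flags get_palindrome_flags_alt
  have hA : (fun (result : List Bool) (word : String) =>
      if PySem.Str.slice? word none none (-1) = some word then result ++ [true]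
      else result ++ [false])
    = (fun (result : List Bool) (word : String) =>
      result ++ [if PySem.Str.slice? word none none (-1) = some word then true else false]) := by
    funext r w; split <;> rfl
  rw [hA, pvFoldlAppend, pvFoldlAppend]
  simp only [List.nil_append]
  apply List.map_congr_left
  intro w _
  exact pvWordFlag w
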